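-- pv_equiv track=rewrite | github.com/GetsEclectic/witness | src/witnessd/webapp.py | _extract_tldr
-- ===== SOURCE A (Python) =====
-- def _extract_tldr(summary_text: str) -> str | None:
--     in_tldr = False
--     lines: list[str] = []
--     for line in summary_text.splitlines():
--         if line.startswith("## TL;DR"):
--             in_tldr = True
--             continue
--         if in_tldr:
--             if line.startswith("##"):
--                 break
--             if line.strip():
--                 lines.append(line.strip())
--             elif lines:
--                 break
--     return " ".join(lines) if lines else None
-- ===== SOURCE B (Python) =====
-- def _extract_tldr(summary_text: str) -> str | None:
--     # Locate the TL;DR header, then extract the first paragraph after it.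
--     lines = summary_text.splitlines()
--     idx = next((i for i, l in enumerate(lines) if l.startswith("## TL;DR")), None)
--     if idx is None:
--         return None
--     body = lines[idx + 1:]
--     while body and not body[0].strip():
--         body = body[1:]
--     para = []
--     for l in body:
--         if not l.strip() or l.startswith("##"):
--             break
--         para.append(l.strip())
--     return " ".join(para) if para else None
-- ===== Notes on version B (the rewrite author's own statement) =====
-- stated objective: simpler
-- what changed: Replaces A's single stateful in_tldr-flag loop with a locate-then-extract decomposition (find the first TL;DR header line, drop leading blanks, take one paragraph up to a blank line or the next '##' header); Pre_ excludes strings with more than one line starting with '## TL;DR', a corner no caller specifies: A skips the repeated header and merges text across it, B stops at it as at any section header, and either value is defensible.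
-- outside the precondition, e.g. on _extract_tldr('## TL;DR\nfoo\n## TL;DR\nbar'): A returns 'foo bar', B returns 'foo'
import Mathlib
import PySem

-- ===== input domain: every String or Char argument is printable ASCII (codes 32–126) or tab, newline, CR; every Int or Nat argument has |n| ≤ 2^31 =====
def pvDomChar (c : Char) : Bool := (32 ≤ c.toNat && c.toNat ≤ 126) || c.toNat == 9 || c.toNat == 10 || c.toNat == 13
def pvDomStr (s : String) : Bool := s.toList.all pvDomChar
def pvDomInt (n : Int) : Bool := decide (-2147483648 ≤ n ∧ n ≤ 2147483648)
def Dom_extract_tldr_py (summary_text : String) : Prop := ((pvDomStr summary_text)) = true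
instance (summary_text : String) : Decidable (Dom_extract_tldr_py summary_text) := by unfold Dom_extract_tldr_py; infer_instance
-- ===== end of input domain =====

-- B replaces A's single stateful flag-loop by a locate-then-extract decomposition;
-- objective: simpler, same cost.

-- ===== PORT A =====
-- the for-loop of A: state = (in_tldr, lines); break returns the accumulator
def pvLoopA : List String → Bool → List String → List String
  | [], _, acc => acc
  | l :: rest, inT, acc =>
    if PySem.Str.startswith l "## TL;DR" then pvLoopA rest true acc
    else if inT then
      if PySem.Str.startswith l "##" then acc
      else if PySem.Str.strip l ≠ "" then pvLoopA rest true (acc ++ [PySem.Str.strip l])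
      else if acc ≠ [] then acc
      else pvLoopA rest true acc
    else pvLoopA rest inT acc

def extract_tldr_py (summary_text : String) : Option String :=
  let lines := pvLoopA (PySem.Str.splitlines summary_text) false []
  if lines ≠ [] then some (PySem.Str.join " " lines) else none

-- ===== PORT B =====
-- 'next((i for i, l in enumerate(lines) if l.startswith("## TL;DR")), None)'
def pvFindHdr : List String → Option Nat
  | [] => none
  | l :: rest =>
    if PySem.Str.startswith l "## TL;DR" then some 0 else (pvFindHdr rest).map (· + 1)

-- the for-loop of B collecting one paragraph, with its break
def pvPara : List String → List String
  | [] => []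
  | l :: rest =>
    if PySem.Str.strip l = "" ∨ PySem.Str.startswith l "##" then []
    else PySem.Str.strip l :: pvPara rest

def extract_tldr_py_alt (summary_text : String) : Option String :=
  let lines := PySem.Str.splitlines summary_text
  match pvFindHdr lines with
  | none => none
  | some i =>
    let body := (lines.drop (i + 1)).dropWhile (fun l => PySem.Str.strip l == "")
    let para := pvPara body
    if para ≠ [] then some (PySem.Str.join " " para) else none

-- ===== PRECONDITION & SPEC =====
-- Pre_ excludes strings with more than one line starting with "## TL;DR", a corner
-- no caller specifies: A skips the repeated header and merges text across it, B
-- stops at it as at any section header, and either value is defensible.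
def Pre_extract_tldr_py (summary_text : String) : Prop :=
  ((PySem.Str.splitlines summary_text).filter
    (fun l => PySem.Str.startswith l "## TL;DR")).length ≤ 1
instance (summary_text : String) : Decidable (Pre_extract_tldr_py summary_text) := by
  unfold Pre_extract_tldr_py; infer_instance

def pvWitness_extract_tldr_py : String := "## TL;DR\nHello there.\n\n## Details\nmore"

def Spec_extract_tldr_py (summary_text : String) (out : Option String) : Prop := out = extract_tldr_py_alt summary_text
instance (summary_text : String) (out : Option String) : Decidable (Spec_extract_tldr_py summary_text out) := by unfold Spec_extract_tldr_py; infer_instance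

-- ===== CLAIM =====
def Claim_equal_extract_tldr_py : Prop := ∀ (summary_text : String), Dom_extract_tldr_py summary_text → Pre_extract_tldr_py summary_text → Spec_extract_tldr_py summary_text (extract_tldr_py summary_text)

-- ===== LEMMAS AND PROOFS =====

-- A's loop after the header has been seen, on a suffix containing no "## TL;DR" line
def pvPhase2 : List String → List String → List String
  | [], acc => acc
  | l :: rest, acc =>
    if PySem.Str.startswith l "##" then acc
    else if PySem.Str.strip l ≠ "" then pvPhase2 rest (acc ++ [PySem.Str.strip l])
    else if acc ≠ [] then acc
    else pvPhase2 rest acc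

-- phase 1: scanning with in_tldr = false just searches for the first header
lemma pvLoopA_false (ls : List String) :
    pvLoopA ls false [] =
      match pvFindHdr ls with
      | none => []
      | some i => pvLoopA (ls.drop (i + 1)) true [] := by
  induction ls with
  | nil => rfl
  | cons l rest ih =>
    cases h : PySem.Str.startswith l "## TL;DR" with
    | true =>
      simp only [pvLoopA, pvFindHdr, h]
      rfl
    | false =>
      simp only [pvLoopA, pvFindHdr, h, Bool.false_eq_true, if_false]
      rw [ih]
      cases hf : pvFindHdr rest with
      | none => simp
      | some i => simp [List.drop_succ_cons]

-- pvFindHdr returns an index whose suffix is delimited by the first header line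
lemma pvFindHdr_split (ls : List String) (i : Nat) (h : pvFindHdr ls = some i) :
    ∃ pre hd, ls = pre ++ hd :: ls.drop (i + 1) ∧ pre.length = i ∧
      (∀ x ∈ pre, PySem.Str.startswith x "## TL;DR" = false) ∧
      PySem.Str.startswith hd "## TL;DR" = true := by
  induction ls generalizing i with
  | nil => simp [pvFindHdr] at h
  | cons l rest ih =>
    rw [pvFindHdr] at h
    by_cases hl : PySem.Str.startswith l "## TL;DR" = true
    · rw [if_pos hl] at h
      injection h with h
      subst h
      exact ⟨[], l, by simp, rfl, by simp, hl⟩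
    · rw [if_neg hl] at h
      simp only [Option.map_eq_some_iff] at h
      obtain ⟨j, hj, rfl⟩ := h
      obtain ⟨pre, hd, heq, hlen, hpre, hhd⟩ := ih j hj
      refine ⟨l :: pre, hd, ?_, by simp [hlen], ?_, hhd⟩
      · simpa [List.drop_succ_cons] using congrArg (l :: ·) heq
      · intro x hx
        rcases List.mem_cons.mp hx with rfl | hx'
        · exact Bool.eq_false_iff.mpr hl
        · exact hpre x hx' 

-- phase 2: with no "## TL;DR" lines left, A's loop is pvPhase2
lemma pvLoopA_true (ls : List String) (acc : List String)
    (h : ∀ l ∈ ls, PySem.Str.startswith l "## TL;DR" = false) :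
    pvLoopA ls true acc = pvPhase2 ls acc := by
  induction ls generalizing acc with
  | nil => rfl
  | cons l rest ih =>
    have hl : PySem.Str.startswith l "## TL;DR" = false := h l (by simp)
    have hrest : ∀ x ∈ rest, PySem.Str.startswith x "## TL;DR" = false :=
      fun x hx => h x (by simp [hx])
    simp only [pvLoopA, pvPhase2, hl, Bool.false_eq_true, if_false]
    split_ifs <;> first | rfl | exact ih _ hrest

-- once the accumulator is non-empty, phase 2 is exactly the take-one-paragraph loop
lemma pvPhase2_ne_nil (ls : List String) (acc : List String) (hacc : acc ≠ []) :
    pvPhase2 ls acc = acc ++ pvPara ls := by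
  induction ls generalizing acc with
  | nil => simp [pvPhase2, pvPara]
  | cons l rest ih =>
    simp only [pvPhase2, pvPara]
    by_cases h2 : PySem.Str.startswith l "##" = true
    · rw [if_pos h2, if_pos (Or.inr h2)]
      simp
    · rw [if_neg h2]
      by_cases h3 : PySem.Str.strip l ≠ ""
      · rw [if_pos h3, if_neg (by tauto), ih _ (by simp)]
        simp
      · rw [if_neg h3, if_pos hacc, if_pos (Or.inl (not_not.mp h3))]
        simp
-- a line starting with "##" does not strip to the empty string
lemma strip_ne_of_hash (l : String) (h : PySem.Str.startswith l "##" = true) :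
    PySem.Str.strip l ≠ "" := by
  have hp : ("##".toList) <+: l.toList := by
    simpa [PySem.Str.startswith, PySem.Chars.startswith, List.isPrefixOf_iff_prefix] using h
  obtain ⟨t, ht⟩ := hp
  intro hcon
  have hnil : PySem.Chars.strip l.toList = [] := by
    have := congrArg String.toList hcon
    simpa [PySem.Str.strip] using this
  rw [PySem.Chars.strip, PySem.Chars.lstrip, PySem.Chars.rstrip] at hnil
  have hmem : '#' ∈ List.dropWhile PySem.Chars.isspace l.toList := by
    rw [← ht]
    simp [show PySem.Chars.isspace '#' = false by decide]
  have hnil2 := List.reverse_eq_nil_iff.mp hnil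
  have hall := List.dropWhile_eq_nil_iff.mp hnil2
  have hmem' : '#' ∈ (List.dropWhile PySem.Chars.isspace l.toList).reverse :=
    List.mem_reverse.mpr hmem
  have := hall '#' hmem'
  simp [show PySem.Chars.isspace '#' = false by decide] at this

-- phase 2 from an empty accumulator = drop blanks, then take one paragraph
lemma pvPhase2_nil (ls : List String) :
    pvPhase2 ls [] = pvPara (ls.dropWhile (fun l => PySem.Str.strip l == "")) := by
  induction ls with
  | nil => rfl
  | cons l rest ih =>
    simp only [pvPhase2, List.dropWhile_cons]
    by_cases h3 : PySem.Str.strip l = ""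
    · have h2 : ¬ PySem.Str.startswith l "##" = true := fun hh => strip_ne_of_hash l hh h3
      rw [if_neg h2, if_neg (not_not_intro h3), if_neg (fun hc => hc rfl),
        if_pos (show (PySem.Str.strip l == "") = true by simp [h3])]
      exact ih
    · rw [if_neg (show ¬ (PySem.Str.strip l == "") = true by simp [h3])]
      simp only [pvPara]
      by_cases h2 : PySem.Str.startswith l "##" = true
      · rw [if_pos h2, if_pos (Or.inr h2)]
      · rw [if_neg h2, if_pos h3, if_neg (by tauto), pvPhase2_ne_nil _ _ (by simp)]
        simp

-- under Pre_, the suffix after the first header contains no further header line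
lemma no_hdr_after (ls : List String) (i : Nat) (hf : pvFindHdr ls = some i)
    (hpre : (ls.filter (fun l => PySem.Str.startswith l "## TL;DR")).length ≤ 1) :
    ∀ l ∈ ls.drop (i + 1), PySem.Str.startswith l "## TL;DR" = false := by
  obtain ⟨pre, hd, heq, hlen, hprefix, hhd⟩ := pvFindHdr_split ls i hf
  intro l hl
  by_contra hcon
  have hcon' : PySem.Str.startswith l "## TL;DR" = true := Bool.not_eq_false _ |>.mp hcon
  have : 2 ≤ (ls.filter (fun l => PySem.Str.startswith l "## TL;DR")).length := by
    rw [heq]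
    rw [List.filter_append, List.filter_cons]
    simp only [hhd, if_pos]
    have h1 : l ∈ (ls.drop (i + 1)).filter (fun l => PySem.Str.startswith l "## TL;DR") :=
      List.mem_filter.mpr ⟨hl, hcon'⟩
    have := List.length_pos_of_mem h1
    simp only [List.length_append, List.length_cons]
    omega
  omega

-- ===== VERDICT =====
theorem extract_tldr_py_spec : Claim_equal_extract_tldr_py := by
  intro s _ hpre
  unfold Spec_extract_tldr_py extract_tldr_py extract_tldr_py_alt
  rw [pvLoopA_false]
  cases hf : pvFindHdr (PySem.Str.splitlines s) with
  | none => simp only [hf]; simp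
  | some i =>
    simp only [hf]
    rw [pvLoopA_true _ _ (no_hdr_after _ _ hf hpre), pvPhase2_nil]
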